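-- pv_equiv track=rewrite | github.com/danielgonzagat/act | scripts/arc_diag_v138_pre.py | _shape_rel_for_pairs
-- ===== SOURCE A (Python) =====
-- from typing import Any, Dict, Iterable, List, Optional, Sequence, Set, Tuple
--
-- def _shape_rel_for_pairs(pairs: Sequence[Tuple[Tuple[int, int], Tuple[int, int]]]) -> str:
--     if not pairs:
--         return "unknown"
--     if all(a == b for a, b in pairs):
--         return "same"
--     if all(b == (a[1], a[0]) for a, b in pairs):
--         return "swap_hw"
--     ratios: Set[Tuple[int, int]] = set()
--     ok = True
--     for (hi, wi), (ho, wo) in pairs: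
--         if hi <= 0 or wi <= 0 or ho <= 0 or wo <= 0:
--             ok = False
--             break
--         if ho % hi != 0 or wo % wi != 0:
--             ok = False
--             break
--         ratios.add((int(ho // hi), int(wo // wi)))
--     if ok and len(ratios) == 1:
--         ry, rx = list(ratios)[0]
--         return f"scale_integer:{int(ry)}x{int(rx)}"
--     return "shape_change_mixed"
-- ===== SOURCE B (Python) =====
-- def _shape_rel_for_pairs(pairs):
--     # One pass over the pairs, maintaining all accumulators at once.
--     all_same = True
--     all_swap = True
--     scale_ok = True
--     ratio = None        # first ratio seen
--     multiple = False    # a ratio different from the first was seen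
--     for a, b in pairs:
--         if a != b:
--             all_same = False
--         if b != (a[1], a[0]):
--             all_swap = False
--         if scale_ok:
--             (hi, wi), (ho, wo) = a, b
--             if hi <= 0 or wi <= 0 or ho <= 0 or wo <= 0 or ho % hi != 0 or wo % wi != 0:
--                 scale_ok = False
--             else:
--                 r = (ho // hi, wo // wi)
--                 if ratio is None:
--                     ratio = r
--                 elif r != ratio:
--                     multiple = True
--     if not pairs:
--         return "unknown"
--     if all_same:
--         return "same"
--     if all_swap:
--         return "swap_hw"
--     if scale_ok and ratio is not None and not multiple:
--         return f"scale_integer:{ratio[0]}x{ratio[1]}"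
--     return "shape_change_mixed"
-- ===== Notes on version B (the rewrite author's own statement) =====
-- stated objective: alternative
-- what changed: Replaces A's three separate passes (two all() scans plus a ratio loop building a set) with a single loop that maintains all_same/all_swap/scale_ok flags together with the first ratio seen and a 'multiple ratios' flag, so no set is built and the list is traversed once.
import Mathlib
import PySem

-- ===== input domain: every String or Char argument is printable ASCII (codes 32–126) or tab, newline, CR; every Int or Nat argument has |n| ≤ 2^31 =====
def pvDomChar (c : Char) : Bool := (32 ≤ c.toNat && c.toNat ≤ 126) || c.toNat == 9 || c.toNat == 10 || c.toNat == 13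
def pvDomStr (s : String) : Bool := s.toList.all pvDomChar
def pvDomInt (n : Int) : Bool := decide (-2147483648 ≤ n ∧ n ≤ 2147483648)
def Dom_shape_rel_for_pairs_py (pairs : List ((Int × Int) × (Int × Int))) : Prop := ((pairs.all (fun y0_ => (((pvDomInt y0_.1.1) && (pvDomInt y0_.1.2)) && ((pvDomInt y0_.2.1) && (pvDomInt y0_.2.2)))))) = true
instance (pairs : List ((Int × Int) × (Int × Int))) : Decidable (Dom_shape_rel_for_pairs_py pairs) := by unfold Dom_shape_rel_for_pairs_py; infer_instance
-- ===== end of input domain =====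

-- B replaces A's three separate passes by a single loop maintaining all accumulators at once
-- (no set is built); same cost, different decomposition. Return-value equivalence is proved.

-- ===== PORT A =====
-- the 'ratios' loop of A, with the 'break' as an early return of (ok, ratios)
def pvRatioLoopA : List ((Int × Int) × (Int × Int)) → PySem.Set (Int × Int) → Bool × PySem.Set (Int × Int)
  | [], acc => (true, acc)
  | p :: rest, acc =>
    if p.1.1 ≤ 0 ∨ p.1.2 ≤ 0 ∨ p.2.1 ≤ 0 ∨ p.2.2 ≤ 0 then (false, acc)
    else if PySem.Int.mod p.2.1 p.1.1 ≠ 0 ∨ PySem.Int.mod p.2.2 p.1.2 ≠ 0 then (false, acc)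
    else pvRatioLoopA rest (PySem.Set.add acc (PySem.Int.floordiv p.2.1 p.1.1, PySem.Int.floordiv p.2.2 p.1.2))

def shape_rel_for_pairs_py (pairs : List ((Int × Int) × (Int × Int))) : String :=
  if pairs = [] then "unknown"
  else if pairs.all (fun p => p.1 == p.2) then "same"
  else if pairs.all (fun p => p.2 == (p.1.2, p.1.1)) then "swap_hw"
  else
    let res := pvRatioLoopA pairs PySem.Set.empty
    if res.1 && (PySem.Set.len res.2 == 1) then
      -- list(ratios)[0] on a one-element set: its unique element (totality guard for [])
      match res.2 with
      | (ry, rx) :: _ => "scale_integer:" ++ PySem.Int.toStr ry ++ "x" ++ PySem.Int.toStr rx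
      | [] => "shape_change_mixed"
    else "shape_change_mixed"

-- ===== PORT B =====
-- single-pass state: (all_same, all_swap, (scale_ok, first ratio, multiple-ratios flag))
def pvScaleStepB (st : Bool × Option (Int × Int) × Bool) (p : (Int × Int) × (Int × Int)) :
    Bool × Option (Int × Int) × Bool :=
  match st with
  | (scaleOk, ratio, multiple) =>
    if scaleOk then
      if p.1.1 ≤ 0 ∨ p.1.2 ≤ 0 ∨ p.2.1 ≤ 0 ∨ p.2.2 ≤ 0 ∨
         PySem.Int.mod p.2.1 p.1.1 ≠ 0 ∨ PySem.Int.mod p.2.2 p.1.2 ≠ 0 then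
        (false, ratio, multiple)
      else
        let r := (PySem.Int.floordiv p.2.1 p.1.1, PySem.Int.floordiv p.2.2 p.1.2)
        match ratio with
        | none => (true, some r, multiple)
        | some r0 => (true, some r0, multiple || decide (r ≠ r0))
    else (false, ratio, multiple)

def pvStepB (s : Bool × Bool × (Bool × Option (Int × Int) × Bool))
    (p : (Int × Int) × (Int × Int)) : Bool × Bool × (Bool × Option (Int × Int) × Bool) :=
  (s.1 && (p.1 == p.2), s.2.1 && (p.2 == (p.1.2, p.1.1)), pvScaleStepB s.2.2 p)

def shape_rel_for_pairs_py_alt (pairs : List ((Int × Int) × (Int × Int))) : String :=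
  let st := pairs.foldl pvStepB (true, true, (true, none, false))
  if pairs = [] then "unknown"
  else if st.1 then "same"
  else if st.2.1 then "swap_hw"
  else if st.2.2.1 && st.2.2.2.1.isSome && !st.2.2.2.2 then
    match st.2.2.2.1 with
    | some (ry, rx) => "scale_integer:" ++ PySem.Int.toStr ry ++ "x" ++ PySem.Int.toStr rx
    | none => "shape_change_mixed"
  else "shape_change_mixed"

-- ===== PRECONDITION & SPEC =====
def Spec_shape_rel_for_pairs_py (pairs : List ((Int × Int) × (Int × Int))) (out : String) : Prop := out = shape_rel_for_pairs_py_alt pairs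
instance (pairs : List ((Int × Int) × (Int × Int))) (out : String) : Decidable (Spec_shape_rel_for_pairs_py pairs out) := by unfold Spec_shape_rel_for_pairs_py; infer_instance

-- ===== CLAIM (what is proved, stated in full; the proofs are below) =====
def Claim_equal_shape_rel_for_pairs_py : Prop := ∀ (pairs : List ((Int × Int) × (Int × Int))), Dom_shape_rel_for_pairs_py pairs → Spec_shape_rel_for_pairs_py pairs (shape_rel_for_pairs_py pairs)

-- ===== LEMMAS AND PROOFS =====

-- B's fold splits into the two all-scans and the scale-only fold
theorem pv_fold_split (pairs : List ((Int × Int) × (Int × Int)))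
    (s1 s2 : Bool) (st : Bool × Option (Int × Int) × Bool) :
    pairs.foldl pvStepB (s1, s2, st) =
      (s1 && pairs.all (fun p => p.1 == p.2),
       s2 && pairs.all (fun p => p.2 == (p.1.2, p.1.1)),
       pairs.foldl pvScaleStepB st) := by
  induction pairs generalizing s1 s2 st with
  | nil => simp
  | cons p rest ih =>
      simp [List.foldl_cons, pvStepB, ih, List.all_cons, Bool.and_assoc]

-- relation between B's scale fold and A's ratios loop
theorem pv_scale_rel (pairs : List ((Int × Int) × (Int × Int))) (acc : PySem.Set (Int × Int)) :
    (pairs.foldl pvScaleStepB (true, acc.head?, decide (2 ≤ acc.length))).1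
        = (pvRatioLoopA pairs acc).1 ∧
    ((pvRatioLoopA pairs acc).1 = true →
      (pairs.foldl pvScaleStepB (true, acc.head?, decide (2 ≤ acc.length))).2.1
          = (pvRatioLoopA pairs acc).2.head? ∧
      (pairs.foldl pvScaleStepB (true, acc.head?, decide (2 ≤ acc.length))).2.2
          = decide (2 ≤ (pvRatioLoopA pairs acc).2.length)) := by
  induction pairs generalizing acc with
  | nil => simp [pvRatioLoopA]
  | cons p rest ih =>
      by_cases hbad : p.1.1 ≤ 0 ∨ p.1.2 ≤ 0 ∨ p.2.1 ≤ 0 ∨ p.2.2 ≤ 0 ∨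
          PySem.Int.mod p.2.1 p.1.1 ≠ 0 ∨ PySem.Int.mod p.2.2 p.1.2 ≠ 0
      · -- the guard fails: A breaks with ok=False, B sets scale_ok=False and keeps it
        have hA : pvRatioLoopA (p :: rest) acc = (false, acc) := by
          unfold pvRatioLoopA
          rcases hbad with h | h | h | h | h | h <;> simp [h]
        have hB : ∀ (l : List ((Int × Int) × (Int × Int))) (r : Option (Int × Int)) (m : Bool),
            l.foldl pvScaleStepB (false, r, m) = (false, r, m) := by
          intro l
          induction l with
          | nil => simp
          | cons q t iht => intro r m; simp [List.foldl_cons, pvScaleStepB, iht]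
        have hstep : pvScaleStepB (true, acc.head?, decide (2 ≤ acc.length)) p
            = (false, acc.head?, decide (2 ≤ acc.length)) := by
          simp [pvScaleStepB, hbad]
        simp [hA, List.foldl_cons, hstep, hB]
      · -- the guard passes: both record the ratio r
        have hP := hbad
        push_neg at hP
        obtain ⟨h1, h2, h3, h4, h5, h6⟩ := hP
        have hA : pvRatioLoopA (p :: rest) acc
            = pvRatioLoopA rest (PySem.Set.add acc
                (PySem.Int.floordiv p.2.1 p.1.1, PySem.Int.floordiv p.2.2 p.1.2)) := by
          have hred : pvRatioLoopA (p :: rest) acc =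
              (if p.1.1 ≤ 0 ∨ p.1.2 ≤ 0 ∨ p.2.1 ≤ 0 ∨ p.2.2 ≤ 0 then (false, acc)
               else if PySem.Int.mod p.2.1 p.1.1 ≠ 0 ∨ PySem.Int.mod p.2.2 p.1.2 ≠ 0 then (false, acc)
               else pvRatioLoopA rest (PySem.Set.add acc
                 (PySem.Int.floordiv p.2.1 p.1.1, PySem.Int.floordiv p.2.2 p.1.2))) := rfl
          rw [hred, if_neg (by omega), if_neg (by simp [h5, h6])]
        set r : Int × Int := (PySem.Int.floordiv p.2.1 p.1.1, PySem.Int.floordiv p.2.2 p.1.2) with hr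
        have hstep : pvScaleStepB (true, acc.head?, decide (2 ≤ acc.length)) p
            = (true, (PySem.Set.add acc r).head?, decide (2 ≤ (PySem.Set.add acc r).length)) := by
          simp only [pvScaleStepB]
          rw [if_pos trivial, if_neg hbad]
          cases acc with
          | nil => simp [PySem.Set.add, PySem.Set.contains, ← hr]
          | cons a t =>
              simp only [List.head?_cons]
              by_cases hra : r = a
              · subst hra
                have : PySem.Set.add (r :: t) r = r :: t :=
                  PySem.Set.add_of_mem (List.mem_cons_self)
                simp [this, ← hr]
              · by_cases hmem : r ∈ (a :: t)
                · have hadd : PySem.Set.add (a :: t) r = a :: t := PySem.Set.add_of_mem hmem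
                  have hrt : r ∈ t := by
                    rcases List.mem_cons.mp hmem with h | h
                    · exact absurd h hra
                    · exact h
                  simp [hadd, hra, ← hr]
                  exact List.length_pos_of_mem hrt
                · have hadd : PySem.Set.add (a :: t) r = (a :: t) ++ [r] :=
                    PySem.Set.add_of_not_mem hmem
                  have hlen : 2 ≤ ((a :: t) ++ [r]).length := by simp
                  simp [hadd, hra, hlen, ← hr]
        rw [hA, List.foldl_cons, hstep]
        exact ih _

-- ===== VERDICT (by name: the statement is the Claim_ definition above) =====
theorem shape_rel_for_pairs_py_spec : Claim_equal_shape_rel_for_pairs_py := by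
  intro pairs _
  unfold Spec_shape_rel_for_pairs_py shape_rel_for_pairs_py shape_rel_for_pairs_py_alt
  rw [pv_fold_split]
  by_cases hnil : pairs = []
  · simp [hnil]
  · simp only [if_neg hnil]
    by_cases hsame : pairs.all (fun p => p.1 == p.2)
    · simp [hsame]
    · by_cases hswap : pairs.all (fun p => p.2 == (p.1.2, p.1.1))
      · simp [hsame, hswap]
      · have hrel := pv_scale_rel pairs PySem.Set.empty
        have hinit : (PySem.Set.empty : PySem.Set (Int × Int)).head? = none := rfl
        have hinit2 : decide (2 ≤ (PySem.Set.empty : PySem.Set (Int × Int)).length) = false := rfl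
        rw [hinit, hinit2] at hrel
        obtain ⟨hok, hrest⟩ := hrel
        simp only [hsame, hswap, Bool.true_and, if_neg, Bool.false_eq_true, not_false_eq_true]
        set res := pvRatioLoopA pairs PySem.Set.empty with hres
        set fs := pairs.foldl pvScaleStepB (true, none, false) with hfs
        by_cases hokv : res.1 = true
        · obtain ⟨hhd, hmul⟩ := hrest hokv
          cases hset : res.2 with
          | nil =>
              have : fs.2.1 = none := by rw [hhd, hset]; rfl
              simp [hokv, hok, hset, this, PySem.Set.len]
          | cons q t =>
              have hq : fs.2.1 = some q := by rw [hhd, hset]; rfl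
              cases t with
              | nil =>
                  have hm : fs.2.2 = false := by rw [hmul, hset]; rfl
                  simp [hokv, hok, hset, hq, hm, PySem.Set.len]
              | cons q2 t2 =>
                  have hm : fs.2.2 = true := by
                    rw [hmul, hset]; simp
                  have hlen : (PySem.Set.len res.2 == 1) = false := by
                    rw [hset]
                    simp only [PySem.Set.len, List.length_cons, beq_eq_false_iff_ne, ne_eq]
                    omega
                  simp [hokv, hok, hset, hq, hm, hlen, PySem.Set.len]
                  intro h; omega
        · have h1 : res.1 = false := by cases h : res.1 <;> simp_all
          have h2 : fs.1 = false := by rw [hok, h1]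
          simp [h1, h2]
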